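-- pv_equiv track=rewrite | github.com/qwzx-qwas/AI-Productization-Observatory | src/normalizers/github.py | _normalize_readme_excerpt
-- ===== SOURCE A (Python) =====
-- from typing import Any
--
-- _README_EXCERPT_MAX_LENGTH = 8000
--
-- def _truncate_at_boundary(value: str, limit: int) -> str:
--     if len(value) <= limit:
--         return value
--     boundary = value.rfind("\n\n", 0, limit)
--     if boundary >= int(limit * 0.6):
--         return value[:boundary].rstrip()
--     return value[:limit].rstrip()
--
-- def _normalize_readme_excerpt(value: Any) -> str | None:
--     if not isinstance(value, str):
--         return None
--
--     filtered_lines: list[str] = []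
--     for raw_line in value.splitlines():
--         line = raw_line.strip()
--         if not line:
--             if filtered_lines and filtered_lines[-1]:
--                 filtered_lines.append("")
--             continue
--         if "img.shields.io" in line or line.startswith("[![") or line.startswith("!["):
--             continue
--         filtered_lines.append(line)
--
--     paragraphs: list[str] = []
--     current: list[str] = []
--     for line in filtered_lines:
--         if line == "":
--             if current:
--                 paragraphs.append(" ".join(current))
--                 current = []
--             continue
--         current.append(line)
--     if current:
--         paragraphs.append(" ".join(current))
--
--     if not paragraphs:
--         return None
--
--     excerpt = "\n\n".join(paragraphs)
--     return _truncate_at_boundary(excerpt, _README_EXCERPT_MAX_LENGTH)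
-- ===== SOURCE B (Python) =====
-- from typing import Any
--
-- _README_EXCERPT_MAX_LENGTH = 8000
--
-- def _truncate_at_boundary(value: str, limit: int) -> str:
--     if len(value) <= limit:
--         return value
--     boundary = value.rfind("\n\n", 0, limit)
--     if boundary >= int(limit * 0.6):
--         return value[:boundary].rstrip()
--     return value[:limit].rstrip()
--
-- def _normalize_readme_excerpt(value: Any) -> str | None:
--     if not isinstance(value, str):
--         return None
--
--     # single pass: build paragraphs directly, no intermediate filtered-lines list
--     paragraphs: list[str] = []
--     current: list[str] = []
--
--     def flush() -> None:
--         nonlocal current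
--         if current:
--             paragraphs.append(" ".join(current))
--             current = []
--
--     for raw_line in value.splitlines():
--         line = raw_line.strip()
--         if not line:
--             flush()
--         elif "img.shields.io" in line or line.startswith(("[![", "![")):
--             continue
--         else:
--             current.append(line)
--     flush()
--
--     if not paragraphs:
--         return None
--     return _truncate_at_boundary("\n\n".join(paragraphs), _README_EXCERPT_MAX_LENGTH)
-- ===== Notes on version B (the rewrite author's own statement) =====
-- stated objective: simpler
-- what changed: B fuses A's two passes (filter lines into an intermediate filtered_lines list, then group it into paragraphs) into a single scan over splitlines() that flushes the current paragraph directly, eliminating the intermediate list.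
import Mathlib
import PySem

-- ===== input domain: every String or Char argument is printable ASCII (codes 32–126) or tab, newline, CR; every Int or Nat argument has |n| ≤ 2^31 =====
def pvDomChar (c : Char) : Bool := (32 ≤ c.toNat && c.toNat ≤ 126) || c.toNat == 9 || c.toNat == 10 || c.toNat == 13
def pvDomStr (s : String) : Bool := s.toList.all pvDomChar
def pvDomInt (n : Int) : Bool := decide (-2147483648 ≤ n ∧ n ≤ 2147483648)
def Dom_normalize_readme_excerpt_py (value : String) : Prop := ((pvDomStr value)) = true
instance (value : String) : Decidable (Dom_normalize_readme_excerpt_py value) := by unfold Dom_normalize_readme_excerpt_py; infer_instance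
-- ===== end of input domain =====

-- B fuses A's two passes (filter lines, then group into paragraphs) into one scan that
-- maintains the current paragraph directly; objective: simpler (no intermediate filtered-lines list).

-- shared helper _truncate_at_boundary (identical code in Source A and Source B).
-- int(limit * 0.6) is ported as floordiv (limit * 6) 10: exact at the only call site
-- limit = 8000, where int(8000 * 0.6) = 4800 = floordiv 48000 10.
def pvTruncate (value : String) (limit : Int) : String :=
  if PySem.Str.len value ≤ limit then value
  else
    let boundary := PySem.Str.rfindFrom value "\n\n" 0 (some limit)
    if boundary ≥ PySem.Int.floordiv (limit * 6) 10 then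
      PySem.Str.rstrip (PySem.Str.slice value none (some boundary))
    else
      PySem.Str.rstrip (PySem.Str.slice value none (some limit))

-- ===== PORT A =====
-- body of A's first loop (filter lines).  `filtered_lines[-1]` is ported as
-- `fl.getLastD ""`: the Python guard `filtered_lines and …` ensures the list is nonempty.
def pvStepFilter (fl : List String) (raw : String) : List String :=
  let line := PySem.Str.strip raw
  if line == "" then
    if fl.isEmpty then fl
    else if fl.getLastD "" == "" then fl
    else fl ++ [""]
  else if PySem.Str.isIn "img.shields.io" line || PySem.Str.startswith line "[![" ||
          PySem.Str.startswith line "![" then fl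
  else fl ++ [line]

-- body of A's second loop (group filtered lines into paragraphs); state = (paragraphs, current)
def pvStepGroup (st : List String × List String) (line : String) : List String × List String :=
  if line == "" then
    if st.2.isEmpty then st else (st.1 ++ [PySem.Str.join " " st.2], [])
  else (st.1, st.2 ++ [line])

def normalize_readme_excerpt_py (value : String) : Option String :=
  let filtered := (PySem.Str.splitlines value).foldl pvStepFilter []
  let st := filtered.foldl pvStepGroup ([], [])
  let paragraphs := if st.2.isEmpty then st.1 else st.1 ++ [PySem.Str.join " " st.2]
  if paragraphs.isEmpty then none
  else some (pvTruncate (PySem.Str.join "\n\n" paragraphs) 8000)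

-- ===== PORT B =====
-- B's flush(): close the current paragraph if nonempty
def pvFlush (st : List String × List String) : List String × List String :=
  if st.2.isEmpty then st else (st.1 ++ [PySem.Str.join " " st.2], [])

-- body of B's single fused loop
def pvStepFused (st : List String × List String) (raw : String) : List String × List String :=
  let line := PySem.Str.strip raw
  if line == "" then pvFlush st
  else if PySem.Str.isIn "img.shields.io" line || PySem.Str.startswith line "[![" ||
          PySem.Str.startswith line "![" then st
  else (st.1, st.2 ++ [line])

def normalize_readme_excerpt_py_alt (value : String) : Option String :=
  let st := pvFlush ((PySem.Str.splitlines value).foldl pvStepFused ([], []))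
  if st.1.isEmpty then none
  else some (pvTruncate (PySem.Str.join "\n\n" st.1) 8000)

-- ===== PRECONDITION & SPEC =====
def Spec_normalize_readme_excerpt_py (value : String) (out : Option String) : Prop := out = normalize_readme_excerpt_py_alt value
instance (value : String) (out : Option String) : Decidable (Spec_normalize_readme_excerpt_py value out) := by unfold Spec_normalize_readme_excerpt_py; infer_instance

-- ===== CLAIM (what is proved, stated in full; the proofs are below) =====
def Claim_equal_normalize_readme_excerpt_py : Prop := ∀ (value : String), Dom_normalize_readme_excerpt_py value → Spec_normalize_readme_excerpt_py value (normalize_readme_excerpt_py value)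

-- ===== LEMMAS AND PROOFS =====

-- a blank line makes the group step flush
lemma stepGroup_blank (st : List String × List String) : pvStepGroup st "" = pvFlush st := by
  simp [pvStepGroup, pvFlush]

-- if the last filtered line is blank (or there is none), the running `current` is empty
lemma cur_empty_of_last_blank (fl : List String)
    (h : fl = [] ∨ (fl ≠ [] ∧ fl.getLastD "" = "")) :
    (fl.foldl pvStepGroup ([], [])).2.isEmpty = true := by
  rcases h with h | ⟨hne, hlast⟩
  · subst h; rfl
  · obtain ⟨fl', x, rfl⟩ := fl.eq_nil_or_concat.resolve_left hne
    simp only [List.concat_eq_append] at hlast ⊢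
    rw [List.getLastD_concat] at hlast
    subst hlast
    rw [List.foldl_append, List.foldl_cons, List.foldl_nil, stepGroup_blank, pvFlush]
    split <;> simp_all

-- key step: filtering one more raw line then grouping = one fused step
lemma step_fuse (fl : List String) (raw : String) :
    (pvStepFilter fl raw).foldl pvStepGroup ([], []) =
      pvStepFused (fl.foldl pvStepGroup ([], [])) raw := by
  simp only [pvStepFilter, pvStepFused]
  by_cases hb : PySem.Str.strip raw = ""
  · simp only [hb, beq_self_eq_true, if_true]
    cases he : fl.isEmpty with
    | true =>
      obtain rfl : fl = [] := List.isEmpty_iff.mp he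
      simp [pvFlush]
    | false =>
      have hne : fl ≠ [] := by simp [← List.isEmpty_iff, he]
      by_cases hl : fl.getLastD "" = ""
      · have hcur := cur_empty_of_last_blank fl (Or.inr ⟨hne, hl⟩)
        simp only [hl, beq_self_eq_true, if_true, pvFlush, hcur]
        simp
      · have hl' : (fl.getLastD "" == "") = false := by simpa using hl
        simp only [hl', Bool.false_eq_true, if_false]
        rw [List.foldl_append, List.foldl_cons, List.foldl_nil, stepGroup_blank]
  · have hb' : (PySem.Str.strip raw == "") = false := by simpa using hb
    simp only [hb', Bool.false_eq_true, if_false]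
    split_ifs with hbad
    · rfl
    · rw [List.foldl_append, List.foldl_cons, List.foldl_nil]
      simp [pvStepGroup, hb]

-- the fused fold equals filter-then-group, for every start list of filtered lines
lemma fold_fuse (ls : List String) (fl : List String) :
    (ls.foldl pvStepFilter fl).foldl pvStepGroup ([], []) =
      ls.foldl pvStepFused (fl.foldl pvStepGroup ([], [])) := by
  induction ls generalizing fl with
  | nil => rfl
  | cons l ls ih => rw [List.foldl_cons, List.foldl_cons, ih, step_fuse]

-- ===== VERDICT (by name: the statement is the Claim_ definition above) =====
theorem normalize_readme_excerpt_py_spec : Claim_equal_normalize_readme_excerpt_py := by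
  intro value _
  unfold Spec_normalize_readme_excerpt_py
  simp only [normalize_readme_excerpt_py, normalize_readme_excerpt_py_alt]
  rw [fold_fuse, List.foldl_nil]
  unfold pvFlush
  split <;> simp_all
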